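-- pv_equiv track=rewrite | github.com/malachikarczmar/COMP170_Spring25_FinalProject | Login Creator - Warnings Removed.py | check_lname
-- ===== SOURCE A (Python) =====
-- def check_lname(lowercase_lname): #Checks truth value for last name validity(must be empty of special characters and numbers). True/False will be used to determine whether to prompt the user again or use the input given
--     hasDigit = False
--     hasSpecial = False
--     special = '''!@$%^&*()_-+={[}]|\\:;"'<,>.\\#'''
--     for letter in lowercase_lname:
--         if letter.isdigit():
--             hasDigit = True
--             break
--     for letter in lowercase_lname:
--         if letter in special:
--             hasSpecial = True
--             break
--     return hasDigit, hasSpecial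
-- ===== SOURCE B (Python) =====
-- def check_lname(lowercase_lname):
--     # Single pass maintaining both flags at once, breaking when both are set.
--     hasDigit = False
--     hasSpecial = False
--     special = '''!@$%^&*()_-+={[}]|\\:;"'<,>.\\#'''
--     for letter in lowercase_lname:
--         if not hasDigit and letter.isdigit():
--             hasDigit = True
--         if not hasSpecial and letter in special:
--             hasSpecial = True
--         if hasDigit and hasSpecial:
--             break
--     return hasDigit, hasSpecial
-- ===== Notes on version B (the rewrite author's own statement) =====
-- stated objective: alternative
-- what changed: A's two separate early-break scans (one for digits, one for special characters) are fused into a single pass over the string that maintains both flags and stops once both are set.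
import Mathlib
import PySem

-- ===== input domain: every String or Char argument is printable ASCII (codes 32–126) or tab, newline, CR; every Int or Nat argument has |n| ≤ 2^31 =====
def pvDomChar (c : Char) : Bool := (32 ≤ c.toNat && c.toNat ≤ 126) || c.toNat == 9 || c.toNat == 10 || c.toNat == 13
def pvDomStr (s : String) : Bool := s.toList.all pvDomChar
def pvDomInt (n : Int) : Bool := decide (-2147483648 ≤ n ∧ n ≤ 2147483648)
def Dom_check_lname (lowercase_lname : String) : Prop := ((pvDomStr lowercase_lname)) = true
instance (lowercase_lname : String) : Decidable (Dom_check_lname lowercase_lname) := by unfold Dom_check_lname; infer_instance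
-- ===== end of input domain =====

-- B fuses A's two separate early-break scans into one pass keeping both flags; same result (alternative decomposition, same cost).

-- ===== PORT A =====
-- the `special` string literal of A (Python '\\' is one backslash)
def checkSpecial : List Char := "!@$%^&*()_-+={[}]|\\:;\"'<,>.\\#".toList

-- A's first loop: `for letter in s: if letter.isdigit(): hasDigit = True; break`
def loopDigitA : List Char → Bool
  | [] => false
  | c :: rest => if PySem.Chars.isdigit c then true else loopDigitA rest

-- A's second loop: `for letter in s: if letter in special: hasSpecial = True; break`
-- (`letter in special` on a 1-char letter = membership of the char in `special`)
def loopSpecialA : List Char → Bool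
  | [] => false
  | c :: rest => if checkSpecial.contains c then true else loopSpecialA rest

def check_lname (lowercase_lname : String) : Bool × Bool :=
  (loopDigitA lowercase_lname.toList, loopSpecialA lowercase_lname.toList)

-- ===== PORT B =====
-- B's single loop over the string with both flags as state, breaking once both hold
def loopBothB : List Char → Bool → Bool → Bool × Bool
  | [], hasDigit, hasSpecial => (hasDigit, hasSpecial)
  | c :: rest, hasDigit, hasSpecial =>
    let hasDigit := if !hasDigit && PySem.Chars.isdigit c then true else hasDigit
    let hasSpecial := if !hasSpecial && checkSpecial.contains c then true else hasSpecial
    if hasDigit && hasSpecial then (hasDigit, hasSpecial)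
    else loopBothB rest hasDigit hasSpecial

def check_lname_alt (lowercase_lname : String) : Bool × Bool :=
  loopBothB lowercase_lname.toList false false

-- ===== PRECONDITION & SPEC =====
def Spec_check_lname (lowercase_lname : String) (out : Bool × Bool) : Prop := out = check_lname_alt lowercase_lname
instance (lowercase_lname : String) (out : Bool × Bool) : Decidable (Spec_check_lname lowercase_lname out) := by unfold Spec_check_lname; infer_instance

-- ===== CLAIM (what is proved, stated in full; the proofs are below) =====
def Claim_equal_check_lname : Prop := ∀ (lowercase_lname : String), Dom_check_lname lowercase_lname → Spec_check_lname lowercase_lname (check_lname lowercase_lname)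

-- ===== LEMMAS AND PROOFS =====
theorem loopBothB_eq (cs : List Char) : ∀ d s : Bool,
    loopBothB cs d s = (d || loopDigitA cs, s || loopSpecialA cs) := by
  induction cs with
  | nil => intro d s; simp [loopBothB, loopDigitA, loopSpecialA]
  | cons c rest ih =>
    intro d s
    have hd : (if !d && PySem.Chars.isdigit c then true else d) = (d || PySem.Chars.isdigit c) := by
      cases d <;> cases PySem.Chars.isdigit c <;> rfl
    have hs : (if !s && checkSpecial.contains c then true else s) = (s || checkSpecial.contains c) := by
      cases s <;> cases checkSpecial.contains c <;> rfl
    simp only [loopBothB, hd, hs, loopDigitA, loopSpecialA]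
    by_cases h : ((d || PySem.Chars.isdigit c) && (s || checkSpecial.contains c)) = true
    · simp only [h, if_true]
      cases hD : PySem.Chars.isdigit c <;> cases hS : checkSpecial.contains c <;> simp_all
    · rw [if_neg h, ih]
      cases hD : PySem.Chars.isdigit c <;> cases hS : checkSpecial.contains c <;> simp_all

-- ===== VERDICT (by name: the statement is the Claim_ definition above) =====
theorem check_lname_spec : Claim_equal_check_lname := by
  intro s _
  unfold Spec_check_lname check_lname check_lname_alt
  rw [loopBothB_eq]
  simp
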